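-- pv_equiv track=rewrite | github.com/Vskesha/learning-modules | CodewarsKATA/alphabetic_anagrams.py | listPosition
-- ===== SOURCE A (Python) =====
-- from collections import Counter
-- from math import factorial, prod
--
-- def listPosition(word):
--     """Return the anagram list position of the word"""
--     if len(word) < 2:
--         return 1
--     chars = Counter(sorted(word))
--     position = 0
--     for char in chars:
--         if char == word[0]:
--             break
--         chars[char] -= 1
--         perm = prod([factorial(v) for v in chars.values() if v > 1])
--         comb = factorial(len(word) - 1) // perm
--         position += comb
--         chars[char] += 1
--     position += listPosition(word[1:])
--     return position
-- ===== SOURCE B (Python) =====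
-- from collections import Counter
-- from math import factorial, prod
--
-- def listPosition(word):
--     """Return the anagram list position of the word (single pass, one Counter maintained in place)."""
--     if len(word) < 2:
--         return 1
--     cnt = Counter(sorted(word))
--     rem = len(word)
--     rank = 1
--     for ch in word:
--         for c in cnt:
--             if c == ch:
--                 break
--             if cnt[c] == 0:
--                 continue
--             cnt[c] -= 1
--             perm = prod(factorial(v) for v in cnt.values() if v > 1)
--             cnt[c] += 1
--             rank += factorial(rem - 1) // perm
--         cnt[ch] -= 1
--         rem -= 1
--     return rank
-- ===== Notes on version B (the rewrite author's own statement) =====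
-- stated objective: alternative
-- what changed: A recurses on the word suffix and rebuilds Counter(sorted(suffix)) and re-sorts at every level; B makes a single iterative pass over the word, building the sorted Counter once and maintaining it in place (decrementing the consumed letter each step), with a flat double loop instead of recursion.
import Mathlib
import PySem

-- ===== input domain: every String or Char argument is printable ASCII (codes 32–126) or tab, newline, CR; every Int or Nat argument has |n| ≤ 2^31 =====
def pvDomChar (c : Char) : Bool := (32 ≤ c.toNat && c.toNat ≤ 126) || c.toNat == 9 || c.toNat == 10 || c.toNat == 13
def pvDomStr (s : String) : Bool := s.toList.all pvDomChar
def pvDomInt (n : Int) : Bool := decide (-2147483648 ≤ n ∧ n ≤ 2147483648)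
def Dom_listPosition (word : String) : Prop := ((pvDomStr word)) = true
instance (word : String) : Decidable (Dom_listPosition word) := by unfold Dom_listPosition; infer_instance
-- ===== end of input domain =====

-- B replaces A's recursion (which rebuilds Counter(sorted(suffix)) at every level) by one
-- iterative pass over the word maintaining a single Counter in place; objective: alternative.

-- ===== PORT A =====
-- math.factorial(v) for v ≥ 0 (all uses here have v ≥ 0)
def pfactA (v : Int) : Int := (Nat.factorial v.toNat : Int)

-- prod([factorial(v) for v in d.values() if v > 1])
def permA (d : PySem.Dict Char Int) : Int :=
  ((d.values.filter (fun v => decide (1 < v))).map pfactA).prod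

-- A's 'for char in chars: … break' loop; chars[char] -= 1 / += 1 around the perm
-- computation is a net identity on the dict, so perm is computed from the decremented dict locally.
def loopA (chars : PySem.Dict Char Int) (n : Int) (w0 : Char) : List Char → Int
  | [] => 0
  | c :: rest =>
      if c = w0 then 0
      else PySem.Int.floordiv (pfactA (n - 1)) (permA (chars.modify c 0 (· - 1)))
           + loopA chars n w0 rest

def goA : List Char → Int
  | [] => 1
  | [_] => 1
  | c0 :: c1 :: rest =>
      let chars := PySem.Dict.counter (PySem.List.sorted (c0 :: c1 :: rest) (fun x => x) false)
      loopA chars ((c0 :: c1 :: rest).length : Int) c0 chars.keys + goA (c1 :: rest)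

def listPosition (word : String) : Int := goA word.toList

-- ===== PORT B =====
def pfactB (v : Int) : Int := (Nat.factorial v.toNat : Int)

def permB (d : PySem.Dict Char Int) : Int :=
  ((d.values.filter (fun v => decide (1 < v))).map pfactB).prod

-- B's inner 'for c in cnt' loop with break/continue; the temporary cnt[c] -= 1 / += 1 around
-- perm is again computed from the decremented dict locally (net identity on the dict).
def innerB (cnt : PySem.Dict Char Int) (rem : Int) (ch : Char) : List Char → Int
  | [] => 0
  | c :: rest =>
      if c = ch then 0
      else if cnt.getD c 0 = 0 then innerB cnt rem ch rest
      else PySem.Int.floordiv (pfactB (rem - 1)) (permB (cnt.modify c 0 (· - 1)))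
           + innerB cnt rem ch rest

-- one iteration of B's outer 'for ch in word' loop; state = (cnt, rem, rank)
def stepB (st : PySem.Dict Char Int × Int × Int) (ch : Char) : PySem.Dict Char Int × Int × Int :=
  (st.1.modify ch 0 (· - 1), st.2.1 - 1, st.2.2 + innerB st.1 st.2.1 ch st.1.keys)

def listPosition_alt (word : String) : Int :=
  let w := word.toList
  if w.length < 2 then 1
  else (w.foldl stepB
        (PySem.Dict.counter (PySem.List.sorted w (fun x => x) false), (w.length : Int), 1)).2.2

-- ===== PRECONDITION & SPEC =====
def Spec_listPosition (word : String) (out : Int) : Prop := out = listPosition_alt word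
instance (word : String) (out : Int) : Decidable (Spec_listPosition word out) := by unfold Spec_listPosition; infer_instance

-- ===== CLAIM (what is proved, stated in full; the proofs are below) =====
def Claim_equal_listPosition : Prop := ∀ (word : String), Dom_listPosition word → Spec_listPosition word (listPosition word)

-- ===== LEMMAS AND PROOFS =====

-- Set.ofList is a sublist of its input
lemma foldl_add_sublist {α : Type} [BEq α] : ∀ (l acc : List α),
    (l.foldl PySem.Set.add acc).Sublist (acc ++ l) := by
  intro l
  induction l with
  | nil => simp
  | cons x t ih =>
    intro acc
    simp only [List.foldl_cons]
    refine (ih (PySem.Set.add acc x)).trans ?_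
    unfold PySem.Set.add
    split
    · exact List.Sublist.append_left (List.sublist_cons_self x t) acc
    · simp

lemma ofList_sublist {α : Type} [BEq α] (l : List α) :
    (PySem.Set.ofList l).Sublist l := by
  rw [PySem.Set.ofList_eq_foldl]
  simpa using foldl_add_sublist l []

-- the distinct elements of a ≤-sorted list are <-sorted
lemma ofList_sorted_lt (l : List Char) (h : l.Pairwise (· ≤ ·)) :
    (PySem.Set.ofList l).Pairwise (· < ·) := by
  have hle : (PySem.Set.ofList l).Pairwise (· ≤ ·) := List.Pairwise.sublist (ofList_sublist l) h
  have hne : (PySem.Set.ofList l).Pairwise (· ≠ ·) := PySem.Set.nodup_ofList l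
  exact (hle.and hne).imp (fun hab => lt_of_le_of_ne hab.1 hab.2)

-- two strictly sorted lists with the same members are equal
lemma eq_of_mem_iff_of_lt (l1 l2 : List Char) (h1 : l1.Pairwise (· < ·))
    (h2 : l2.Pairwise (· < ·)) (h : ∀ x, x ∈ l1 ↔ x ∈ l2) : l1 = l2 := by
  have nd1 : l1.Nodup := h1.imp (fun hab => ne_of_lt hab)
  have nd2 : l2.Nodup := h2.imp (fun hab => ne_of_lt hab)
  have hperm : l1.Perm l2 := (List.perm_ext_iff_of_nodup nd1 nd2).mpr h
  have e1 : PySem.List.sorted l2 (fun x => x) = l1 :=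
    PySem.List.sorted_eq_of_perm_of_pairwise_lt l2 l1 (fun x => x) hperm h1
  have e2 : PySem.List.sorted l2 (fun x => x) = l2 :=
    PySem.List.sorted_eq_of_perm_of_pairwise_lt l2 l2 (fun x => x) (List.Perm.refl l2) h2
  rw [← e1, e2]

-- A's break-loop as a sum over a takeWhile prefix
lemma loopA_sum (d : PySem.Dict Char Int) (n : Int) (w0 : Char) : ∀ L : List Char,
    loopA d n w0 L =
      ((L.takeWhile (fun c => !(c == w0))).map
        (fun c => PySem.Int.floordiv (pfactA (n - 1)) (permA (d.modify c 0 (· - 1))))).sum := by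
  intro L
  induction L with
  | nil => simp [loopA]
  | cons c rest ih =>
    by_cases hc : c = w0
    · simp [loopA, hc]
    · simp [loopA, hc, ih]

-- B's break/continue loop as a sum over a filtered takeWhile prefix
lemma innerB_sum (cnt : PySem.Dict Char Int) (n : Int) (ch : Char) : ∀ L : List Char,
    innerB cnt n ch L =
      (((L.takeWhile (fun c => !(c == ch))).filter (fun c => !(cnt.getD c 0 == 0))).map
        (fun c => PySem.Int.floordiv (pfactB (n - 1)) (permB (cnt.modify c 0 (· - 1))))).sum := by
  intro L
  induction L with
  | nil => simp [innerB]
  | cons c rest ih =>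
    by_cases hc : c = ch
    · simp [innerB, hc]
    · by_cases h0 : cnt.getD c 0 = 0
      · simp [innerB, hc, h0, ih]
      · simp [innerB, hc, h0, ih]

-- takeWhile (≠ ch) commutes with a filter whose predicate holds at ch
lemma takeWhile_filter_comm (p : Char → Bool) (ch : Char) (hp : p ch = true) :
    ∀ l : List Char,
      (l.filter p).takeWhile (fun c => !(c == ch)) =
      (l.takeWhile (fun c => !(c == ch))).filter p := by
  intro l
  induction l with
  | nil => simp
  | cons a t ih =>
    by_cases hac : a = ch
    · subst hac; simp [hp]
    · by_cases hpa : p a = true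
      · simp [hpa, hac, ih]
      · simp [hpa, hac, ih]

-- a key with non-zero count is present
lemma mem_keys_of_getD_ne (cnt : PySem.Dict Char Int) (k : Char)
    (h : cnt.getD k 0 ≠ 0) : k ∈ cnt.keys := by
  rcases hc : cnt.contains k with _ | _
  · exact absurd (PySem.Dict.getD_of_not_contains cnt 0 hc) h
  · exact (PySem.Dict.contains_iff_mem_keys cnt k).mp hc

-- modify at a present key keeps the key list
lemma keys_modify_of_mem (cnt : PySem.Dict Char Int) (k : Char) (f : Int → Int)
    (h : k ∈ cnt.keys) : (cnt.modify k 0 f).keys = cnt.keys := by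
  rw [PySem.Dict.keys_modify]
  exact PySem.Dict.keys_insert_of_contains cnt _ ((PySem.Dict.contains_iff_mem_keys cnt k).mpr h)

-- A's per-level loop equals B's inner loop, given B's counter invariant
lemma step_eq (cnt : PySem.Dict Char Int) (s : List Char) (ch : Char) (n : Int)
    (h1 : cnt.keys.Pairwise (· < ·))
    (h2 : ∀ k, cnt.getD k 0 = (s.count k : Int))
    (hch : ch ∈ s) :
    loopA (PySem.Dict.counter (PySem.List.sorted s (fun x => x) false)) n ch
        (PySem.Dict.counter (PySem.List.sorted s (fun x => x) false)).keys
      = innerB cnt n ch cnt.keys := by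
  set SL := PySem.List.sorted s (fun x => x) false with hSL
  set dA := PySem.Dict.counter SL with hdA
  have hKA : dA.keys = PySem.Set.ofList SL := PySem.Dict.keys_counter SL
  have hKAlt : dA.keys.Pairwise (· < ·) := by
    rw [hKA]; exact ofList_sorted_lt SL (PySem.List.sorted_pairwise s (fun x => x))
  have hcount : ∀ k, SL.count k = s.count k :=
    fun k => (PySem.List.sorted_perm s (fun x => x) false).count_eq k
  have hgetA : ∀ k, dA.getD k 0 = (s.count k : Int) := by
    intro k; rw [hdA, PySem.Dict.getD_counter, hcount]
  set p : Char → Bool := fun c => !(cnt.getD c 0 == 0) with hp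
  have hmemp : ∀ k, p k = true ↔ k ∈ s := by
    intro k
    simp only [hp, Bool.not_eq_eq_eq_not, Bool.not_true, beq_eq_false_iff_ne, ne_eq, h2]
    constructor
    · intro hne
      have : s.count k ≠ 0 := by exact_mod_cast hne
      exact List.count_pos_iff.mp (Nat.pos_of_ne_zero this)
    · intro hk
      have : 0 < s.count k := List.count_pos_iff.mpr hk
      exact_mod_cast Nat.pos_iff_ne_zero.mp this
  have hKfilter : dA.keys = cnt.keys.filter p := by
    apply eq_of_mem_iff_of_lt _ _ hKAlt (h1.filter p)
    intro x
    rw [hKA, PySem.Set.mem_ofList, (PySem.List.sorted_perm s (fun x => x) false).mem_iff,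
      List.mem_filter, hmemp]
    constructor
    · intro hx
      refine ⟨mem_keys_of_getD_ne cnt x ?_, hx⟩
      rw [h2]
      have : 0 < s.count x := List.count_pos_iff.mpr hx
      exact_mod_cast Nat.pos_iff_ne_zero.mp this
    · exact fun hx => hx.2
  have hpch : p ch = true := (hmemp ch).mpr hch
  rw [loopA_sum, innerB_sum, hKfilter, takeWhile_filter_comm p ch hpch]
  apply congrArg List.sum
  apply List.map_congr_left
  intro c hc
  have hpc : p c = true := (List.mem_filter.mp hc).2
  have hcs : c ∈ s := (hmemp c).mp hpc
  have hpc0 : cnt.getD c 0 ≠ 0 := by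
    rw [h2]
    have : 0 < s.count c := List.count_pos_iff.mpr hcs
    exact_mod_cast Nat.pos_iff_ne_zero.mp this
  have hcK : c ∈ cnt.keys := mem_keys_of_getD_ne cnt c hpc0
  have hcKA : c ∈ dA.keys := by
    rw [hKfilter]; exact List.mem_filter.mpr ⟨hcK, hpc⟩
  have hndA : dA.keys.Nodup := hKAlt.imp (fun hab => ne_of_lt hab)
  have hndB : cnt.keys.Nodup := h1.imp (fun hab => ne_of_lt hab)
  have hkeysA : (dA.modify c 0 (· - 1)).keys = dA.keys := keys_modify_of_mem dA c _ hcKA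
  have hkeysB : (cnt.modify c 0 (· - 1)).keys = cnt.keys := keys_modify_of_mem cnt c _ hcK
  have hvA := PySem.Dict.values_eq_map_keys (dA.modify c 0 (· - 1)) (by rw [hkeysA]; exact hndA) 0
  have hvB := PySem.Dict.values_eq_map_keys (cnt.modify c 0 (· - 1)) (by rw [hkeysB]; exact hndB) 0
  set g : Char → Int := fun k => if k = c then (s.count c : Int) - 1 else (s.count k : Int) with hg
  have hgA : ∀ k, (dA.modify c 0 (· - 1)).getD k 0 = g k := by
    intro k; rw [PySem.Dict.getD_modify, hg]
    by_cases hkc : k = c <;> simp [hkc, hgetA]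
  have hgB : ∀ k, (cnt.modify c 0 (· - 1)).getD k 0 = g k := by
    intro k; rw [PySem.Dict.getD_modify, hg]
    by_cases hkc : k = c <;> simp [hkc, h2]
  have himp : ∀ k, decide (1 < g k) = true → p k = true := by
    intro k hk
    rw [decide_eq_true_eq] at hk
    by_cases hkc : k = c
    · rw [hkc]; exact hpc
    · rw [hmemp]
      apply List.count_pos_iff.mp
      have : (1 : Int) < (s.count k : Int) := by rw [hg] at hk; simpa [hkc] using hk
      omega
  have hlists : (dA.modify c 0 (· - 1)).values.filter (fun v => decide (1 < v))
      = (cnt.modify c 0 (· - 1)).values.filter (fun v => decide (1 < v)) := by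
    rw [hvA, hvB, hkeysA, hkeysB,
      List.map_congr_left (fun k _ => hgA k), List.map_congr_left (fun k _ => hgB k),
      hKfilter, List.filter_map, List.filter_map, List.filter_filter]
    apply congrArg (List.map g)
    apply List.filter_congr
    intro k hk
    rcases hq : decide (1 < g k) with _ | _
    · simp [Function.comp, hq]
    · simp [Function.comp, hq, himp k hq]
  simp [permA, permB, hlists, show pfactA = pfactB from rfl]

-- main invariant: B's fold over the suffix s computes rank + (goA s - 1)
lemma main_inv : ∀ (s : List Char) (cnt : PySem.Dict Char Int) (rank : Int),
    cnt.keys.Pairwise (· < ·) →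
    (∀ k, cnt.getD k 0 = (s.count k : Int)) →
    (s.foldl stepB (cnt, (s.length : Int), rank)).2.2 = rank + goA s - 1 := by
  intro s
  induction s with
  | nil => intro cnt rank _ _; simp [goA]
  | cons ch rest ih =>
    intro cnt rank h1 h2
    have hch : ch ∈ ch :: rest := List.mem_cons_self
    have hgd : cnt.getD ch 0 ≠ 0 := by
      rw [h2]
      have : 0 < (ch :: rest).count ch := List.count_pos_iff.mpr hch
      exact_mod_cast Nat.pos_iff_ne_zero.mp this
    have hKch : ch ∈ cnt.keys := mem_keys_of_getD_ne cnt ch hgd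
    have h1' : (cnt.modify ch 0 (· - 1)).keys.Pairwise (· < ·) := by
      rw [keys_modify_of_mem cnt ch _ hKch]; exact h1
    have h2' : ∀ k, (cnt.modify ch 0 (· - 1)).getD k 0 = (rest.count k : Int) := by
      intro k
      rw [PySem.Dict.getD_modify]
      by_cases hkc : k = ch
      · subst hkc
        rw [if_pos rfl, h2]
        simp
      · rw [if_neg hkc, h2]
        have : (ch == k) = false := by simpa using fun e => hkc e.symm
        simp [List.count_cons, this]
    simp only [List.foldl_cons, stepB]
    have hrem : ((ch :: rest).length : Int) - 1 = (rest.length : Int) := by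
      push_cast [List.length_cons]; ring
    rw [hrem, ih _ _ h1' h2']
    cases rest with
    | nil =>
      rw [← step_eq cnt [ch] ch _ h1 h2 (by simp)]
      rw [show (PySem.Dict.counter (PySem.List.sorted [ch] (fun x => x) false)).keys = [ch] from rfl]
      simp [goA, loopA]
    | cons c1 rest' =>
      rw [← step_eq cnt (ch :: c1 :: rest') ch _ h1 h2 hch]
      simp only [goA]
      ring

-- ===== VERDICT (by name: the statement is the Claim_ definition above) =====
theorem listPosition_spec : Claim_equal_listPosition := by
  intro word _
  unfold Spec_listPosition listPosition listPosition_alt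
  by_cases h : word.toList.length < 2
  · rw [if_pos h]
    rcases hw : word.toList with _ | ⟨a, _ | ⟨b, t⟩⟩
    · simp [goA]
    · simp [goA]
    · rw [hw] at h; simp at h
  · simp only [if_neg h]
    rw [main_inv word.toList _ 1 ?_ ?_]
    · ring
    · rw [PySem.Dict.keys_counter]
      exact ofList_sorted_lt _ (PySem.List.sorted_pairwise _ _)
    · intro k
      rw [PySem.Dict.getD_counter,
        (PySem.List.sorted_perm word.toList (fun x => x) false).count_eq]
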